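-- pv_equiv track=rewrite | github.com/mvendra/mvtools | parsing_dsl/miniparse.py | split_either_direction
-- ===== SOURCE A (Python) =====
-- def split_either_direction(thestr, term_chars, reverse=False):
--
--     # validate thestr
--     if thestr is None:
--         return None
--     if not isinstance(thestr, str):
--         return None
--     if len(thestr) == 0:
--         return None
--
--     # validate term_chars
--     if term_chars is None:
--         return None
--     if not isinstance(term_chars, list):
--         return None
--     if len(term_chars) == 0:
--         return None
--
--     range_start = None
--     range_end = None
--
--     if reverse:
--         range_start = len(thestr)-1
--         range_end = -1
--         fs = -1
--     else:
--         range_start = 0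
--         range_end = len(thestr)
--         fs = 1
--
--     # get the next
--     for i in range(range_start, range_end, fs):
--         if thestr[i] in term_chars:
--             return (thestr[:i], thestr[i:])
--
--     # no matches
--     return None
-- ===== SOURCE B (Python) =====
-- def split_either_direction(thestr, term_chars, reverse=False):
--
--     # validate thestr
--     if thestr is None or not isinstance(thestr, str) or len(thestr) == 0:
--         return None
--
--     # validate term_chars
--     if term_chars is None or not isinstance(term_chars, list) or len(term_chars) == 0:
--         return None
--
--     # one library search per terminator character; membership in a list of
--     # strings can only ever match single-character elements, so filter those
--     hits = []
--     for c in term_chars: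
--         if isinstance(c, str) and len(c) == 1:
--             idx = thestr.rfind(c) if reverse else thestr.find(c)
--             if idx != -1:
--                 hits.append(idx)
--
--     if not hits:
--         return None
--
--     i = max(hits) if reverse else min(hits)
--     return (thestr[:i], thestr[i:])
-- ===== Notes on version B (the rewrite author's own statement) =====
-- stated objective: faster
-- what changed: Instead of scanning the string index-by-index and testing each character for list membership, B runs one str.find (or str.rfind when reverse) per single-character terminator and takes the min (resp. max) of the hit positions.
import Mathlib
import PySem

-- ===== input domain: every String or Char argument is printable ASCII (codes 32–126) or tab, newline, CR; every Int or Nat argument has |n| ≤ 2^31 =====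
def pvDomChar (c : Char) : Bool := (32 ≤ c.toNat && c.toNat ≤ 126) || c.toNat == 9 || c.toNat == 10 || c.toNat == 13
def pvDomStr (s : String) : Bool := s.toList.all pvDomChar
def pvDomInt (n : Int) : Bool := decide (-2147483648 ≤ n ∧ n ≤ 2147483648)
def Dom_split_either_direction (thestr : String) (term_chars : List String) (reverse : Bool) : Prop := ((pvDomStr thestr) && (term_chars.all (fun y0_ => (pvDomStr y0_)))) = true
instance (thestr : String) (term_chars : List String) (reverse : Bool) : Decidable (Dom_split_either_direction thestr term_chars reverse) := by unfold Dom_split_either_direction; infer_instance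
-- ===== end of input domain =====

-- B replaces A's index-by-index membership scan with one str.find/str.rfind per
-- single-character terminator plus a min/max selection (objective: faster, measured
-- in a timing run; the scan moves into C-level library search). Same return value.

-- ===== PORT A =====
-- the 'for i in range(range_start, range_end, fs)' loop with its early return;
-- thestr[i] is a 1-char string, 'in term_chars' is list membership (string equality)
def pvLoopA (thestr : String) (term_chars : List String) : List Int → Option (String × String)
  | [] => none
  | i :: rest =>
    match PySem.Str.pyGet? thestr i with
    | none => none   -- IndexError; unreachable: every generated index is in range
    | some c =>
      if term_chars.contains (String.ofList [c]) then
        some (PySem.Str.slice thestr none (some i), PySem.Str.slice thestr (some i) none)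
      else pvLoopA thestr term_chars rest

def split_either_direction (thestr : String) (term_chars : List String) (reverse : Bool) : Option (String × String) :=
  -- validate thestr (is-None / isinstance checks are identically true under the type convention)
  if PySem.Str.len thestr = 0 then none
  -- validate term_chars
  else if (term_chars.length : Int) = 0 then none
  else
    let range_start : Int := if reverse then PySem.Str.len thestr - 1 else 0
    let range_end : Int := if reverse then -1 else PySem.Str.len thestr
    let fs : Int := if reverse then -1 else 1
    pvLoopA thestr term_chars (PySem.List.pyRange range_start range_end fs)

-- ===== PORT B =====
-- idx = thestr.rfind(c) if reverse else thestr.find(c)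
def pvIdxB (thestr : String) (reverse : Bool) (c : String) : Int :=
  if reverse then PySem.Str.rfind thestr c else PySem.Str.find thestr c

def split_either_direction_alt (thestr : String) (term_chars : List String) (reverse : Bool) : Option (String × String) :=
  if PySem.Str.len thestr = 0 then none
  else if (term_chars.length : Int) = 0 then none
  else
    -- for c in term_chars: if isinstance(c, str) and len(c) == 1: ... hits.append(idx)
    let hits : List Int := term_chars.foldl (fun acc c =>
      if PySem.Str.len c = 1 then
        (if pvIdxB thestr reverse c ≠ -1 then acc ++ [pvIdxB thestr reverse c] else acc)
      else acc) []
    -- if not hits: return None;  i = max(hits) if reverse else min(hits)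
    match (if reverse then PySem.List.max? hits (fun x => x) else PySem.List.min? hits (fun x => x)) with
    | none => none
    | some i => some (PySem.Str.slice thestr none (some i), PySem.Str.slice thestr (some i) none)

-- ===== PRECONDITION & SPEC =====
def Spec_split_either_direction (thestr : String) (term_chars : List String) (reverse : Bool) (out : Option (String × String)) : Prop := out = split_either_direction_alt thestr term_chars reverse
instance (thestr : String) (term_chars : List String) (reverse : Bool) (out : Option (String × String)) : Decidable (Spec_split_either_direction thestr term_chars reverse out) := by unfold Spec_split_either_direction; infer_instance

-- ===== CLAIM (what is proved, stated in full; the proofs are below) =====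
def Claim_equal_split_either_direction : Prop := ∀ (thestr : String) (term_chars : List String) (reverse : Bool), Dom_split_either_direction thestr term_chars reverse → Spec_split_either_direction thestr term_chars reverse (split_either_direction thestr term_chars reverse)

-- ===== LEMMAS AND PROOFS =====

-- index k of thestr is a terminator position (the predicate both programs decide)
def pvHit (thestr : String) (term_chars : List String) (k : Nat) : Bool :=
  match thestr.toList[k]? with
  | some ch => term_chars.contains (String.ofList [ch])
  | none => false

-- the common result shape
def pvSplitAt (thestr : String) (i : Int) : Option (String × String) :=
  some (PySem.Str.slice thestr none (some i), PySem.Str.slice thestr (some i) none)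

lemma pvHit_lt {thestr : String} {term_chars : List String} {k : Nat}
    (h : pvHit thestr term_chars k = true) : k < thestr.toList.length := by
  unfold pvHit at h
  cases hg : thestr.toList[k]? with
  | none => rw [hg] at h; simp at h
  | some ch => exact (List.getElem?_eq_some_iff.mp hg).1

lemma pvPrefix_singleton (a : Char) (l : List Char) (k : Nat) :
    ([a] <+: l.drop k) ↔ l[k]? = some a := by
  rw [← List.head?_drop]
  constructor
  · rintro ⟨t, ht⟩
    rw [← ht]; rfl
  · intro h
    cases hd : l.drop k with
    | nil => rw [hd] at h; simp at h
    | cons x xs => rw [hd] at h; simp at h; subst h; exact ⟨xs, rfl⟩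

-- spec of PySem.Chars.rfind.go (PySem ships no spec lemma for rfind)
lemma pvRfindGo_spec (s sub : List Char) (j : Nat) :
    (PySem.Chars.rfind.go s sub j = -1 ∧ ∀ i ≤ j, ¬ sub <+: s.drop i) ∨
    (∃ k : Nat, k ≤ j ∧ PySem.Chars.rfind.go s sub j = (k : Int) ∧ sub <+: s.drop k ∧
      ∀ i, k < i → i ≤ j → ¬ sub <+: s.drop i) := by
  induction j with
  | zero =>
    by_cases h : sub.isPrefixOf s
    · right
      exact ⟨0, le_refl 0, by simp [PySem.Chars.rfind.go, h], by simpa [List.isPrefixOf_iff_prefix] using h, by omega⟩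
    · left
      refine ⟨by simp [PySem.Chars.rfind.go, h], ?_⟩
      intro i hi
      interval_cases i
      simpa [List.isPrefixOf_iff_prefix] using h
  | succ j ih =>
    by_cases h : sub.isPrefixOf (s.drop (j+1))
    · right
      exact ⟨j+1, le_refl _, by simp [PySem.Chars.rfind.go, h], by simpa [List.isPrefixOf_iff_prefix] using h, by omega⟩
    · have hne : ¬ sub <+: s.drop (j+1) := by simpa [List.isPrefixOf_iff_prefix] using h
      have hgo : PySem.Chars.rfind.go s sub (j+1) = PySem.Chars.rfind.go s sub j := by
        simp [PySem.Chars.rfind.go, h]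
      rcases ih with ⟨h1, h2⟩ | ⟨k, hk1, hk2, hk3, hk4⟩
      · left
        refine ⟨hgo.trans h1, ?_⟩
        intro i hi
        rcases Nat.lt_or_ge i (j+1) with hlt | hge
        · exact h2 i (by omega)
        · have : i = j + 1 := by omega
          subst this; exact hne
      · right
        refine ⟨k, by omega, hgo.trans hk2, hk3, ?_⟩
        intro i hi1 hi2
        rcases Nat.lt_or_ge i (j+1) with hlt | hge
        · exact hk4 i hi1 (by omega)
        · have : i = j + 1 := by omega
          subst this; exact hne

lemma pvRfind_spec (s sub : List Char) :
    (PySem.Chars.rfind s sub = -1 ∧ ∀ i ≤ s.length, ¬ sub <+: s.drop i) ∨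
    (∃ k : Nat, k ≤ s.length ∧ PySem.Chars.rfind s sub = (k : Int) ∧ sub <+: s.drop k ∧
      ∀ i, k < i → i ≤ s.length → ¬ sub <+: s.drop i) := by
  simpa [PySem.Chars.rfind] using pvRfindGo_spec s sub s.length

lemma pvLoopA_fwd_none (thestr : String) (tcs : List String) :
    ∀ (m a : Nat), thestr.toList.length ≤ a + m →
    (∀ k, a ≤ k → pvHit thestr tcs k = false) →
    pvLoopA thestr tcs (PySem.List.pyRange (a : Int) (thestr.toList.length : Int) 1) = none := by
  intro m
  induction m with
  | zero =>
    intro a hm _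
    rw [PySem.List.pyRange_one_eq_nil (by omega)]
    rfl
  | succ m ih =>
    intro a hm hno
    rcases Nat.lt_or_ge a thestr.toList.length with hlt | hge
    · rw [PySem.List.pyRange_one_cons (by exact_mod_cast hlt)]
      show (match PySem.Str.pyGet? thestr (a : Int) with
        | none => none
        | some c => if tcs.contains (String.ofList [c]) then _ else pvLoopA thestr tcs _) = none
      rw [PySem.Str.pyGet?_natCast, List.getElem?_eq_getElem hlt]
      have hh := hno a le_rfl
      unfold pvHit at hh
      rw [List.getElem?_eq_getElem hlt] at hh
      simp only at hh ⊢
      rw [hh]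
      rw [if_neg Bool.false_ne_true]
      have : (a : Int) + 1 = ((a + 1 : Nat) : Int) := by push_cast; ring
      rw [this]
      exact ih (a + 1) (by omega) (fun k hk => hno k (by omega))
    · rw [PySem.List.pyRange_one_eq_nil (by exact_mod_cast hge)]
      rfl

lemma pvLoopA_fwd_some (thestr : String) (tcs : List String) :
    ∀ (m a k0 : Nat), thestr.toList.length ≤ a + m → a ≤ k0 →
    pvHit thestr tcs k0 = true →
    (∀ j, a ≤ j → j < k0 → pvHit thestr tcs j = false) →
    pvLoopA thestr tcs (PySem.List.pyRange (a : Int) (thestr.toList.length : Int) 1) =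
      pvSplitAt thestr (k0 : Int) := by
  intro m
  induction m with
  | zero =>
    intro a k0 hm hak hk _
    have := pvHit_lt hk
    omega
  | succ m ih =>
    intro a k0 hm hak hk hmin
    have hk0n := pvHit_lt hk
    have hlt : a < thestr.toList.length := by omega
    rw [PySem.List.pyRange_one_cons (by exact_mod_cast hlt)]
    show (match PySem.Str.pyGet? thestr (a : Int) with
      | none => none
      | some c => if tcs.contains (String.ofList [c]) then
          some (PySem.Str.slice thestr none (some (a:Int)), PySem.Str.slice thestr (some (a:Int)) none)
        else pvLoopA thestr tcs _) = _
    rw [PySem.Str.pyGet?_natCast, List.getElem?_eq_getElem hlt]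
    simp only
    rcases Nat.eq_or_lt_of_le hak with rfl | halt
    · unfold pvHit at hk
      rw [List.getElem?_eq_getElem hlt] at hk
      simp only at hk
      rw [hk]
      simp [pvSplitAt]
    · have hh := hmin a le_rfl halt
      unfold pvHit at hh
      rw [List.getElem?_eq_getElem hlt] at hh
      simp only at hh
      rw [hh]
      rw [if_neg Bool.false_ne_true]
      have : (a : Int) + 1 = ((a + 1 : Nat) : Int) := by push_cast; ring
      rw [this]
      exact ih (a + 1) k0 (by omega) (by omega) hk (fun j hj1 hj2 => hmin j (by omega) hj2)

lemma pvLoopA_rev_none (thestr : String) (tcs : List String) :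
    ∀ (b : Nat), b ≤ thestr.toList.length →
    (∀ k, k < b → pvHit thestr tcs k = false) →
    pvLoopA thestr tcs (PySem.List.pyRange ((b : Int) - 1) (-1) (-1)) = none := by
  intro b
  induction b with
  | zero =>
    intro _ _
    rw [PySem.List.pyRange_neg_one_eq_nil (by norm_num)]
    rfl
  | succ b ih =>
    intro hb hno
    have hcons : PySem.List.pyRange ((b:Int) + 1 - 1) (-1) (-1) = (b:Int) :: PySem.List.pyRange ((b:Int) - 1) (-1) (-1) := by
      have := PySem.List.pyRange_neg_one_cons (a := (b:Int)) (b := -1) (by omega)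
      simpa using this
    rw [show ((b+1:Nat):Int) - 1 = (b:Int) + 1 - 1 by push_cast; ring, hcons]
    show (match PySem.Str.pyGet? thestr (b : Int) with
      | none => none
      | some c => if tcs.contains (String.ofList [c]) then _ else pvLoopA thestr tcs _) = none
    have hblt : b < thestr.toList.length := by omega
    rw [PySem.Str.pyGet?_natCast, List.getElem?_eq_getElem hblt]
    have hh := hno b (by omega)
    unfold pvHit at hh
    rw [List.getElem?_eq_getElem hblt] at hh
    simp only at hh ⊢
    rw [hh]
    rw [if_neg Bool.false_ne_true]
    exact ih (by omega) (fun k hk => hno k (by omega))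

lemma pvLoopA_rev_some (thestr : String) (tcs : List String) :
    ∀ (b k0 : Nat), b ≤ thestr.toList.length → k0 < b →
    pvHit thestr tcs k0 = true →
    (∀ j, k0 < j → j < b → pvHit thestr tcs j = false) →
    pvLoopA thestr tcs (PySem.List.pyRange ((b : Int) - 1) (-1) (-1)) =
      pvSplitAt thestr (k0 : Int) := by
  intro b
  induction b with
  | zero => intro k0 _ h; omega
  | succ b ih =>
    intro k0 hb hk0b hk hmax
    have hcons : PySem.List.pyRange ((b:Int) + 1 - 1) (-1) (-1) = (b:Int) :: PySem.List.pyRange ((b:Int) - 1) (-1) (-1) := by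
      have := PySem.List.pyRange_neg_one_cons (a := (b:Int)) (b := -1) (by omega)
      simpa using this
    rw [show ((b+1:Nat):Int) - 1 = (b:Int) + 1 - 1 by push_cast; ring, hcons]
    have hblt : b < thestr.toList.length := by omega
    show (match PySem.Str.pyGet? thestr (b : Int) with
      | none => none
      | some c => if tcs.contains (String.ofList [c]) then
          some (PySem.Str.slice thestr none (some (b:Int)), PySem.Str.slice thestr (some (b:Int)) none)
        else pvLoopA thestr tcs _) = _
    rw [PySem.Str.pyGet?_natCast, List.getElem?_eq_getElem hblt]
    simp only
    rcases Nat.eq_or_lt_of_le (Nat.le_of_lt_succ hk0b) with rfl | hlt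
    · unfold pvHit at hk
      rw [List.getElem?_eq_getElem hblt] at hk
      simp only at hk
      rw [hk]
      simp [pvSplitAt]
    · have hh := hmax b hlt (by omega)
      unfold pvHit at hh
      rw [List.getElem?_eq_getElem hblt] at hh
      simp only at hh
      rw [hh]
      rw [if_neg Bool.false_ne_true]
      exact ih k0 (by omega) hlt hk (fun j hj1 hj2 => hmax j hj1 (by omega))

lemma pvHits_mem (thestr : String) (tcs : List String) (reverse : Bool) (x : Int) :
    x ∈ tcs.foldl (fun acc c =>
      if PySem.Str.len c = 1 then
        (if pvIdxB thestr reverse c ≠ -1 then acc ++ [pvIdxB thestr reverse c] else acc)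
      else acc) [] ↔
    ∃ c ∈ tcs, PySem.Str.len c = 1 ∧ pvIdxB thestr reverse c ≠ -1 ∧ pvIdxB thestr reverse c = x := by
  have hbody : (fun (acc : List Int) (c : String) =>
      if PySem.Str.len c = 1 then
        (if pvIdxB thestr reverse c ≠ -1 then acc ++ [pvIdxB thestr reverse c] else acc)
      else acc) = fun acc c =>
      if PySem.Str.len c = 1 ∧ pvIdxB thestr reverse c ≠ -1 then acc ++ [pvIdxB thestr reverse c] else acc := by
    funext acc c
    split_ifs <;> tauto
  rw [hbody, PySem.List.foldl_append_ite]
  simp [List.mem_filter, List.mem_map]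
  constructor
  · rintro ⟨c, ⟨hc, h1, h2⟩, hx⟩
    exact ⟨c, hc, h1, h2, hx⟩
  · rintro ⟨c, hc, h1, h2, hx⟩
    exact ⟨c, ⟨hc, h1, h2⟩, hx⟩

lemma pvHits_sound (thestr : String) (tcs : List String) (reverse : Bool) {c : String}
    (hc : c ∈ tcs) (h1 : PySem.Str.len c = 1) (hne : pvIdxB thestr reverse c ≠ -1) :
    ∃ k : Nat, pvIdxB thestr reverse c = (k : Int) ∧ pvHit thestr tcs k = true := by
  obtain ⟨ch, hch⟩ : ∃ a, c.toList = [a] := by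
    rw [PySem.Str.len_eq] at h1
    exact List.length_eq_one_iff.mp (by exact_mod_cast h1)
  have hcofl : String.ofList [ch] = c := by rw [← hch]; exact String.ofList_toList
  cases reverse with
  | false =>
    unfold pvIdxB at hne ⊢
    rw [if_neg Bool.false_ne_true] at hne ⊢
    rw [PySem.Str.find_eq, hch] at hne ⊢
    have hnonneg : 0 ≤ PySem.Chars.find thestr.toList [ch] := by
      have := PySem.Chars.neg_one_le_find thestr.toList [ch]
      omega
    have hspec := PySem.Chars.find_spec (s := thestr.toList) (sub := [ch]) hnonneg
    refine ⟨(PySem.Chars.find thestr.toList [ch]).toNat, by omega, ?_⟩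
    have hpre := hspec.1
    rw [pvPrefix_singleton] at hpre
    simp only [pvHit, hpre, hcofl]
    exact List.contains_iff_mem.mpr hc
  | true =>
    unfold pvIdxB at hne ⊢
    rw [if_pos rfl] at hne ⊢
    rw [PySem.Str.rfind_eq, hch] at hne ⊢
    rcases pvRfind_spec thestr.toList [ch] with ⟨h1', _⟩ | ⟨k, _, hk2, hk3, _⟩
    · exact absurd h1' hne
    · refine ⟨k, hk2, ?_⟩
      rw [pvPrefix_singleton] at hk3
      simp only [pvHit, hk3, hcofl]
      exact List.contains_iff_mem.mpr hc

lemma pvHits_complete_fwd (thestr : String) (tcs : List String) {k : Nat}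
    (hk : pvHit thestr tcs k = true) :
    ∃ c ∈ tcs, PySem.Str.len c = 1 ∧ pvIdxB thestr false c ≠ -1 ∧
      pvIdxB thestr false c ≤ (k : Int) := by
  unfold pvHit at hk
  cases hg : thestr.toList[k]? with
  | none => rw [hg] at hk; simp at hk
  | some ch =>
    rw [hg] at hk
    simp only at hk
    have hmem : String.ofList [ch] ∈ tcs := List.contains_iff_mem.mp hk
    refine ⟨String.ofList [ch], hmem, ?_, ?_, ?_⟩
    · simp [PySem.Str.len_eq]
    all_goals {
      unfold pvIdxB
      rw [if_neg Bool.false_ne_true, PySem.Str.find_eq]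
      have htl : (String.ofList [ch]).toList = [ch] := by simp
      rw [htl]
      have hinfix : [ch] <:+: thestr.toList := by
        rw [List.singleton_infix_iff]
        exact List.mem_of_getElem? hg
      have hnonneg : 0 ≤ PySem.Chars.find thestr.toList [ch] :=
        (PySem.Chars.find_nonneg_iff _ _).mpr hinfix
      first
      | omega
      | ( have hspec := PySem.Chars.find_spec (s := thestr.toList) (sub := [ch]) hnonneg
          have hnot := hspec.2
          by_cases hle : (PySem.Chars.find thestr.toList [ch]).toNat ≤ k
          · omega
          · exfalso
            exact hnot k (by omega) ((pvPrefix_singleton ch thestr.toList k).mpr hg) )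
    }

lemma pvHits_complete_rev (thestr : String) (tcs : List String) {k : Nat}
    (hk : pvHit thestr tcs k = true) :
    ∃ c ∈ tcs, PySem.Str.len c = 1 ∧ pvIdxB thestr true c ≠ -1 ∧
      (k : Int) ≤ pvIdxB thestr true c := by
  unfold pvHit at hk
  cases hg : thestr.toList[k]? with
  | none => rw [hg] at hk; simp at hk
  | some ch =>
    rw [hg] at hk
    simp only at hk
    have hmem : String.ofList [ch] ∈ tcs := List.contains_iff_mem.mp hk
    have hklen : k < thestr.toList.length := (List.getElem?_eq_some_iff.mp hg).1
    have hpre : [ch] <+: thestr.toList.drop k := (pvPrefix_singleton ch thestr.toList k).mpr hg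
    refine ⟨String.ofList [ch], hmem, by simp [PySem.Str.len_eq], ?_, ?_⟩
    all_goals {
      unfold pvIdxB
      rw [if_pos rfl, PySem.Str.rfind_eq]
      have htl : (String.ofList [ch]).toList = [ch] := by simp
      rw [htl]
      rcases pvRfind_spec thestr.toList [ch] with ⟨_, h2⟩ | ⟨k', _, hk2, _, hk4⟩
      · exact absurd hpre (h2 k (by omega))
      · rw [hk2]
        first
        | (intro hcon; omega)
        | ( by_cases hle : k ≤ k'
            · omega
            · exfalso
              exact hk4 k (by omega) (by omega) hpre )
    }

lemma pvMain (thestr : String) (term_chars : List String) (reverse : Bool) :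
    split_either_direction thestr term_chars reverse = split_either_direction_alt thestr term_chars reverse := by
  by_cases hs : PySem.Str.len thestr = 0
  · unfold split_either_direction split_either_direction_alt
    rw [if_pos hs, if_pos hs]
  by_cases ht : (term_chars.length : Int) = 0
  · unfold split_either_direction split_either_direction_alt
    rw [if_neg hs, if_pos ht, if_neg hs, if_pos ht]
  have hlen : PySem.Str.len thestr = (thestr.toList.length : Int) := PySem.Str.len_eq thestr
  by_cases hhit : ∃ k, pvHit thestr term_chars k = true
  · -- some terminator occurs in thestr
    cases reverse with
    | false =>
      have k0 := Nat.find hhit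
      have hk0 : pvHit thestr term_chars (Nat.find hhit) = true := Nat.find_spec hhit
      have hA : split_either_direction thestr term_chars false = pvSplitAt thestr ((Nat.find hhit : Nat) : Int) := by
        unfold split_either_direction
        rw [if_neg hs, if_neg ht]
        show pvLoopA thestr term_chars (PySem.List.pyRange 0 (PySem.Str.len thestr) 1) = _
        rw [hlen, show (0 : Int) = ((0 : Nat) : Int) by norm_num]
        exact pvLoopA_fwd_some thestr term_chars thestr.toList.length 0 (Nat.find hhit)
          (by omega) (Nat.zero_le _) hk0
          (fun j _ hj => Bool.not_eq_true _ |>.mp (Nat.find_min hhit hj))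
      have hB : split_either_direction_alt thestr term_chars false = pvSplitAt thestr ((Nat.find hhit : Nat) : Int) := by
        unfold split_either_direction_alt
        rw [if_neg hs, if_neg ht]
        obtain ⟨c, hc, hc1, hcne, hcle⟩ := pvHits_complete_fwd thestr term_chars hk0
        have hxmem : pvIdxB thestr false c ∈ term_chars.foldl (fun acc c =>
            if PySem.Str.len c = 1 then
              (if pvIdxB thestr false c ≠ -1 then acc ++ [pvIdxB thestr false c] else acc)
            else acc) [] := (pvHits_mem thestr term_chars false _).mpr ⟨c, hc, hc1, hcne, rfl⟩
        cases hm : PySem.List.min? (term_chars.foldl (fun acc c =>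
            if PySem.Str.len c = 1 then
              (if pvIdxB thestr false c ≠ -1 then acc ++ [pvIdxB thestr false c] else acc)
            else acc) []) (fun x => x) with
        | none =>
          rw [PySem.List.min?_eq_none_iff] at hm
          rw [hm] at hxmem
          exact absurd hxmem (List.not_mem_nil)
        | some m =>
          have hmmem := PySem.List.min?_mem hm
          obtain ⟨c', hc', hc'1, hc'ne, hc'x⟩ := (pvHits_mem thestr term_chars false m).mp hmmem
          obtain ⟨k, hkx, hkhit⟩ := pvHits_sound thestr term_chars false hc' hc'1 hc'ne
          have hk0le : Nat.find hhit ≤ k := Nat.find_min' hhit hkhit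
          have hmin := PySem.List.min?_isMin hm _ hxmem
          have hmk : m = ((Nat.find hhit : Nat) : Int) := by
            have h1 : ((Nat.find hhit : Nat) : Int) ≤ (k : Int) := by exact_mod_cast hk0le
            have h2 : m = (k : Int) := by rw [← hc'x, hkx]
            have h3 : m ≤ pvIdxB thestr false c := by simpa using hmin
            omega
          show (match PySem.List.min? _ (fun x => x) with
            | none => none
            | some i => some (PySem.Str.slice thestr none (some i), PySem.Str.slice thestr (some i) none)) = _
          rw [hm, hmk]
          rfl
      rw [hA, hB]
    | true =>
      obtain ⟨kw, hkw⟩ := hhit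
      have hkwn : kw < thestr.toList.length := pvHit_lt hkw
      have hk0 : pvHit thestr term_chars
          (Nat.findGreatest (fun k => pvHit thestr term_chars k = true) thestr.toList.length) = true :=
        by simpa using Nat.findGreatest_spec (P := fun k => pvHit thestr term_chars k = true) (Nat.le_of_lt hkwn) hkw
      set k0 := Nat.findGreatest (fun k => pvHit thestr term_chars k = true) thestr.toList.length with hk0def
      have hk0n : k0 < thestr.toList.length := pvHit_lt hk0
      have hmax : ∀ j, k0 < j → j < thestr.toList.length → pvHit thestr term_chars j = false := by
        intro j hj1 hj2
        have h := Nat.findGreatest_is_greatest (P := fun k => pvHit thestr term_chars k = true) (n := thestr.toList.length) (k := j) hj1 (by omega)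
        exact Bool.not_eq_true _ |>.mp (by simpa using h)
      have hA : split_either_direction thestr term_chars true = pvSplitAt thestr ((k0 : Nat) : Int) := by
        unfold split_either_direction
        rw [if_neg hs, if_neg ht]
        show pvLoopA thestr term_chars (PySem.List.pyRange (PySem.Str.len thestr - 1) (-1) (-1)) = _
        rw [hlen]
        exact pvLoopA_rev_some thestr term_chars thestr.toList.length k0 le_rfl hk0n hk0 hmax
      have hB : split_either_direction_alt thestr term_chars true = pvSplitAt thestr ((k0 : Nat) : Int) := by
        unfold split_either_direction_alt
        rw [if_neg hs, if_neg ht]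
        obtain ⟨c, hc, hc1, hcne, hcle⟩ := pvHits_complete_rev thestr term_chars hk0
        have hxmem : pvIdxB thestr true c ∈ term_chars.foldl (fun acc c =>
            if PySem.Str.len c = 1 then
              (if pvIdxB thestr true c ≠ -1 then acc ++ [pvIdxB thestr true c] else acc)
            else acc) [] := (pvHits_mem thestr term_chars true _).mpr ⟨c, hc, hc1, hcne, rfl⟩
        cases hm : PySem.List.max? (term_chars.foldl (fun acc c =>
            if PySem.Str.len c = 1 then
              (if pvIdxB thestr true c ≠ -1 then acc ++ [pvIdxB thestr true c] else acc)
            else acc) []) (fun x => x) with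
        | none =>
          rw [PySem.List.max?_eq_none_iff] at hm
          rw [hm] at hxmem
          exact absurd hxmem (List.not_mem_nil)
        | some m =>
          have hmmem := PySem.List.max?_mem hm
          obtain ⟨c', hc', hc'1, hc'ne, hc'x⟩ := (pvHits_mem thestr term_chars true m).mp hmmem
          obtain ⟨k, hkx, hkhit⟩ := pvHits_sound thestr term_chars true hc' hc'1 hc'ne
          have hkle : k ≤ k0 := Nat.le_findGreatest (Nat.le_of_lt (pvHit_lt hkhit)) hkhit
          have hmaxle := PySem.List.max?_isMax hm _ hxmem
          have hmk : m = ((k0 : Nat) : Int) := by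
            have h1 : (k : Int) ≤ ((k0 : Nat) : Int) := by exact_mod_cast hkle
            have h2 : m = (k : Int) := by rw [← hc'x, hkx]
            have h3 : pvIdxB thestr true c ≤ m := by simpa using hmaxle
            omega
          show (match PySem.List.max? _ (fun x => x) with
            | none => none
            | some i => some (PySem.Str.slice thestr none (some i), PySem.Str.slice thestr (some i) none)) = _
          rw [hm, hmk]
          rfl
      rw [hA, hB]
  · -- no terminator occurs
    push Not at hhit
    have hno : ∀ k, pvHit thestr term_chars k = false := fun k => Bool.not_eq_true _ |>.mp (hhit k)
    have hB : split_either_direction_alt thestr term_chars reverse = none := by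
      unfold split_either_direction_alt
      rw [if_neg hs, if_neg ht]
      have hnil : term_chars.foldl (fun acc c =>
          if PySem.Str.len c = 1 then
            (if pvIdxB thestr reverse c ≠ -1 then acc ++ [pvIdxB thestr reverse c] else acc)
          else acc) [] = [] := by
        rw [List.eq_nil_iff_forall_not_mem]
        intro x hx
        obtain ⟨c, hc, hc1, hcne, hcx⟩ := (pvHits_mem thestr term_chars reverse x).mp hx
        obtain ⟨k, _, hkhit⟩ := pvHits_sound thestr term_chars reverse hc hc1 hcne
        rw [hno k] at hkhit
        exact Bool.false_ne_true hkhit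
      rw [hnil]
      cases reverse <;> rfl
    have hA : split_either_direction thestr term_chars reverse = none := by
      unfold split_either_direction
      rw [if_neg hs, if_neg ht]
      cases reverse with
      | false =>
        show pvLoopA thestr term_chars (PySem.List.pyRange 0 (PySem.Str.len thestr) 1) = none
        rw [hlen, show (0 : Int) = ((0 : Nat) : Int) by norm_num]
        exact pvLoopA_fwd_none thestr term_chars thestr.toList.length 0 (by omega) (fun k _ => hno k)
      | true =>
        show pvLoopA thestr term_chars (PySem.List.pyRange (PySem.Str.len thestr - 1) (-1) (-1)) = none
        rw [hlen]
        exact pvLoopA_rev_none thestr term_chars thestr.toList.length le_rfl (fun k _ => hno k)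
    rw [hA, hB]

-- ===== VERDICT (by name: the statement is the Claim_ definition above) =====
theorem split_either_direction_spec : Claim_equal_split_either_direction := by
  intro thestr term_chars reverse _
  unfold Spec_split_either_direction
  exact pvMain thestr term_chars reverse
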